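-- pv_equiv track=rewrite | github.com/DataDog/helm-charts | scripts/update-clusterrole.py | format_rule
-- ===== SOURCE A (Python) =====
-- def quote_val(v):
--     """Quote special YAML values."""
--     if v == "*":
--         return "'*'"
--     if v.startswith("*") and "/" in v:
--         return "'" + v + "'"
--     if v == "":
--         return '""'
--     return v
--
-- def format_rule(rule):
--     """Format a single RBAC rule as YAML text lines."""
--     lines = []
--     if "nonResourceURLs" in rule:
--         lines.append("- nonResourceURLs:")
--         for u in rule["nonResourceURLs"]:
--             lines.append("  - " + u)
--     if "apiGroups" in rule:
--         lines.append("- apiGroups:")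
--         for g in rule["apiGroups"]:
--             lines.append("  - " + quote_val(g))
--     if "resourceNames" in rule:
--         lines.append("  resourceNames:")
--         for n in rule["resourceNames"]:
--             lines.append("  - " + n)
--     if "resources" in rule:
--         lines.append("  resources:")
--         for res in rule["resources"]:
--             lines.append("  - " + quote_val(res))
--     lines.append("  verbs:")
--     for v in rule["verbs"]:
--         lines.append("  - " + quote_val(v))
--     return lines
-- ===== SOURCE B (Python) =====
-- def quote_val(v):
--     """Quote special YAML values."""
--     if v == "*":
--         return "'*'"
--     if v.startswith("*") and "/" in v:
--         return "'" + v + "'"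
--     if v == "":
--         return '""'
--     return v
--
-- def format_rule(rule):
--     """Format a single RBAC rule as YAML text lines.
--
--     Built back-to-front by recursion: each section prepends itself (header
--     cons'ed onto recursively rendered items) to the already-built tail,
--     starting from the mandatory verbs block (missing 'verbs' raises KeyError).
--     """
--     def render(vals, f, rest):
--         if not vals:
--             return rest
--         return ["  - " + f(vals[0])] + render(vals[1:], f, rest)
--
--     def section(key, header, f, rest):
--         if key in rule:
--             return [header] + render(rule[key], f, rest)
--         return rest
--
--     ident = lambda s: s
--     tail = ["  verbs:"] + render(rule["verbs"], quote_val, [])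
--     return section("nonResourceURLs", "- nonResourceURLs:", ident,
--            section("apiGroups", "- apiGroups:", quote_val,
--            section("resourceNames", "  resourceNames:", ident,
--            section("resources", "  resources:", quote_val, tail))))
-- ===== Notes on version B (the rewrite author's own statement) =====
-- stated objective: alternative
-- what changed: Replaces A's forward accumulator loops (repeated list.append into one shared lines list) with a recursive back-to-front construction: the verbs block is built first and each optional section prepends its header and recursively rendered items onto the already-built tail; no mutation and no append-accumulator.
import Mathlib
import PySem

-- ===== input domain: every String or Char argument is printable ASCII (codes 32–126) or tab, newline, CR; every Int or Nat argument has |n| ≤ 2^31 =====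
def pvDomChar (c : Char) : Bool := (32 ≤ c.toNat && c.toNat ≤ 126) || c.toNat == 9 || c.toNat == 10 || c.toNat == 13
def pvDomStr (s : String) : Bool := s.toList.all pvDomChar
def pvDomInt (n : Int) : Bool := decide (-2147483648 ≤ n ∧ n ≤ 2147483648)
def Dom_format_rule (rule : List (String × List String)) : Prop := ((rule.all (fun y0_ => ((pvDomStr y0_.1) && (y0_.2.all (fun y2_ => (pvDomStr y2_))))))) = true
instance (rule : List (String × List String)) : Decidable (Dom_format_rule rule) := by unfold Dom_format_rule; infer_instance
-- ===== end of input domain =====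

-- B builds the lines back-to-front by recursion (sections prepend onto the tail) instead of A's forward append-accumulator; same output, same cost (objective: alternative).


-- ===== PORT A =====
-- helper quote_val, shared by both Pythons verbatim
def quoteVal (v : String) : String :=
  if v == "*" then "'*'"
  else if PySem.Str.startswith v "*" && PySem.Str.isIn "/" v then "'" ++ v ++ "'"
  else if v == "" then "\"\""
  else v

def format_rule (rule : List (String × List String)) : List String :=
  let d := PySem.Dict.mk rule
  let lines : List String := []
  let lines := if d.contains "nonResourceURLs" then
      (d.getD "nonResourceURLs" []).foldl (fun ls u => ls ++ ["  - " ++ u])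
        (lines ++ ["- nonResourceURLs:"])
    else lines
  let lines := if d.contains "apiGroups" then
      (d.getD "apiGroups" []).foldl (fun ls g => ls ++ ["  - " ++ quoteVal g])
        (lines ++ ["- apiGroups:"])
    else lines
  let lines := if d.contains "resourceNames" then
      (d.getD "resourceNames" []).foldl (fun ls n => ls ++ ["  - " ++ n])
        (lines ++ ["  resourceNames:"])
    else lines
  let lines := if d.contains "resources" then
      (d.getD "resources" []).foldl (fun ls r => ls ++ ["  - " ++ quoteVal r])
        (lines ++ ["  resources:"])
    else lines
  (d.getD "verbs" []).foldl (fun ls v => ls ++ ["  - " ++ quoteVal v])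
    (lines ++ ["  verbs:"])

-- ===== PORT B =====
-- render vals f rest: recursively cons rendered items onto the already-built tail
def renderB (vals : List String) (f : String → String) (rest : List String) : List String :=
  match vals with
  | [] => rest
  | v :: vs => ("  - " ++ f v) :: renderB vs f rest

def sectionB (d : PySem.Dict String (List String)) (key header : String)
    (f : String → String) (rest : List String) : List String :=
  if d.contains key then header :: renderB (d.getD key []) f rest else rest

def format_rule_alt (rule : List (String × List String)) : List String :=
  let d := PySem.Dict.mk rule
  let tail := "  verbs:" :: renderB (d.getD "verbs" []) quoteVal []
  sectionB d "nonResourceURLs" "- nonResourceURLs:" (fun s => s)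
    (sectionB d "apiGroups" "- apiGroups:" quoteVal
      (sectionB d "resourceNames" "  resourceNames:" (fun s => s)
        (sectionB d "resources" "  resources:" quoteVal tail)))

-- ===== PRECONDITION & SPEC =====
-- Pre_ excludes rules without a "verbs" key, on which Python A (and B) raises KeyError.
def Pre_format_rule (rule : List (String × List String)) : Prop :=
  (rule.any (fun p => p.1 == "verbs")) = true
instance (rule : List (String × List String)) : Decidable (Pre_format_rule rule) := by
  unfold Pre_format_rule; infer_instance

def pvWitness_format_rule : (List (String × List String)) :=
  [("apiGroups", ["*", ""]), ("resources", ["pods"]), ("verbs", ["get", "*"])]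

def Spec_format_rule (rule : List (String × List String)) (out : List String) : Prop := out = format_rule_alt rule
instance (rule : List (String × List String)) (out : List String) : Decidable (Spec_format_rule rule out) := by unfold Spec_format_rule; infer_instance

-- ===== CLAIM (what is proved, stated in full; the proofs are below) =====
def Claim_equal_format_rule : Prop := ∀ (rule : List (String × List String)), Dom_format_rule rule → Pre_format_rule rule → Spec_format_rule rule (format_rule rule)

-- ===== LEMMAS AND PROOFS =====
theorem foldl_app_map {α β : Type} (f : α → β) (xs : List α) (acc : List β) :
    xs.foldl (fun ls u => ls ++ [f u]) acc = acc ++ xs.map f := by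
  induction xs generalizing acc with
  | nil => simp
  | cons x xs ih => simp [List.foldl, ih]

theorem renderB_eq (vals : List String) (f : String → String) (rest : List String) :
    renderB vals f rest = vals.map (fun x => "  - " ++ f x) ++ rest := by
  induction vals with
  | nil => simp [renderB]
  | cons v vs ih => simp [renderB, ih]

-- ===== VERDICT (by name: the statement is the Claim_ definition above) =====
theorem format_rule_spec : Claim_equal_format_rule := by
  intro rule _ _
  unfold Spec_format_rule format_rule format_rule_alt sectionB
  simp only [foldl_app_map, renderB_eq]
  split_ifs <;> simp_all
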